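-- pv_equiv track=rewrite | github.com/FoMelanie/P7_project | 1_feature_engineering_cleaning/cleaning.py | select_feature_from_highly_correlated_group
-- ===== SOURCE A (Python) =====
-- from typing import List
--
-- def select_feature_from_highly_correlated_group(correlated_groups:List, keeping_method:str="mean")-> List:
--     """From a list of nested lists containing groups of highly correlated features, keep one that is representative of the group.
--     The selection is made according to the keeping_method, meaning that the feature containing the keyword indicated by the keeping_method
--     will be kept and others will be discarded.
--
--     Args:
--         correlated_groups (List): List containing highly correlated features in nested lists.
--         keeping_method (str, optional): The feature in the group will be kept if it contains this keyword, otherwise another value will be kept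
--         according to this order: mean>sum>var>max>min. If none of these keywords are contained in the variable name, the first one in the list will
--         be selected. Defaults to "mean".
--
--     Returns:
--         List: A list containing kept features.
--     """
--
--     features_to_keep = []
--
--     # Ordered types of feature to select, remove the wanted one from this list
--     types_of_feature=["mean","sum","var","max","min"]
--     types_of_feature.remove(keeping_method)
--
--     for group in correlated_groups:
--
--         # If there is a variable that contains the desired keyword, keep it
--         keeping_feature = next((s for s in group if keeping_method in s.lower()), None)
--         if keeping_feature:
--             features_to_keep.append(keeping_feature)
--
--         # If there is no variable that contain the desired keyword, iterate over the group to keep the feature according to the previous list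
--         if not keeping_feature:
--             for type_of_feature in types_of_feature:
--                 keeping_feature = next((s for s in group if type_of_feature in s.lower()), None)
--                 if keeping_feature:
--                     features_to_keep.append(keeping_feature)
--                     break
--
--         # If there is no variable that contains any of the keywords in types_of_feature list, select the first variable
--         if not keeping_feature:
--             features_to_keep.append(group[0])
--
--     return features_to_keep
-- ===== SOURCE B (Python) =====
-- def select_feature_from_highly_correlated_group(correlated_groups, keeping_method="mean"):
--     keywords = ["mean", "sum", "var", "max", "min"]
--     # priority order: the wanted keyword first, then the rest in their fixed order
--     priority = [keeping_method] + [k for k in keywords if k != keeping_method]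
--     features_to_keep = []
--     for group in correlated_groups:
--         best, best_rank = None, len(priority)
--         for feature in group:
--             low = feature.lower()
--             rank = next((i for i, k in enumerate(priority) if k in low), len(priority))
--             if rank < best_rank:
--                 best, best_rank = feature, rank
--         features_to_keep.append(best if best is not None else group[0])
--     return features_to_keep
-- ===== Notes on version B (the rewrite author's own statement) =====
-- stated objective: alternative
-- what changed: Instead of up to five successive scans of each group (one per keyword in priority order), B makes a single pass over each group, computing for every feature its rank = index of the highest-priority keyword it contains, and keeps the earliest minimum-rank feature; Pre_ excludes the raising inputs (keeping_method outside the five keywords, where list.remove raises, and empty groups, where group[0] raises).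
-- outside the precondition, e.g. on select_feature_from_highly_correlated_group([['a']], 'median'): A raises ValueError, B returns ['a']; on select_feature_from_highly_correlated_group([[]], 'mean'): A raises IndexError, B raises IndexError
import Mathlib
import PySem

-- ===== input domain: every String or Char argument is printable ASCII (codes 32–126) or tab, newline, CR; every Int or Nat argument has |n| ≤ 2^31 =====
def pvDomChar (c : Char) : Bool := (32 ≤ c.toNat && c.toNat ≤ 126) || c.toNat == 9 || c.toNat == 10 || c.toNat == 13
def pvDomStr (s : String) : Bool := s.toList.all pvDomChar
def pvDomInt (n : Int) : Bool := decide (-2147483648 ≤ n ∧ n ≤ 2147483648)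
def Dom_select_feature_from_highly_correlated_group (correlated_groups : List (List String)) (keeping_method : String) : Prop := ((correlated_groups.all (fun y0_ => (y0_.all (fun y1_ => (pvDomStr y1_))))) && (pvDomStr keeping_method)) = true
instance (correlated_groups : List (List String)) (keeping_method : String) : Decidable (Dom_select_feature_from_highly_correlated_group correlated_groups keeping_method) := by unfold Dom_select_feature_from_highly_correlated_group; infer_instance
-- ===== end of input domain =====

-- B replaces A's up-to-five priority-ordered scans of each group by a single pass that ranks every
-- feature by the highest-priority keyword it contains and keeps the earliest minimum-rank feature
-- (objective: alternative decomposition, same result on Pre_).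

-- ===== PORT A =====
-- next((s for s in group if kw in s.lower()), None)
def pvNextKw (kw : String) (g : List String) : Option String :=
  g.find? (fun s => PySem.Str.isIn kw (PySem.Str.lower s))

-- A's inner 'for type_of_feature in types_of_feature: … break' loop
def pvTypesLoop (types : List String) (g : List String) : Option String :=
  match types with
  | [] => none
  | t :: ts =>
    match pvNextKw t g with
    | some f => some f
    | none => pvTypesLoop ts g

def select_feature_from_highly_correlated_group (correlated_groups : List (List String)) (keeping_method : String) : List String :=
  match PySem.List.remove? ["mean", "sum", "var", "max", "min"] keeping_method with
  | none => []  -- list.remove raises ValueError here; excluded by Pre_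
  | some types_of_feature =>
    correlated_groups.foldl (fun features_to_keep group =>
      let keeping_feature := pvNextKw keeping_method group
      let keeping_feature :=
        match keeping_feature with
        | some f => some f
        | none => pvTypesLoop types_of_feature group
      match keeping_feature with
      | some f => features_to_keep ++ [f]
      | none => features_to_keep ++ [(PySem.List.pyGet? group 0).getD ""]) []
        -- group[0] raises IndexError on an empty group; excluded by Pre_

-- ===== PORT B =====
-- rank = next((i for i, k in enumerate(priority) if k in low), len(priority))
def pvRank (priority : List String) (f : String) : Nat :=
  priority.findIdx (fun k => PySem.Str.isIn k (PySem.Str.lower f))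

-- one step of B's inner loop: keep the strictly better-ranked feature
def pvBestStep (priority : List String) (st : Option String × Nat) (f : String) : Option String × Nat :=
  if pvRank priority f < st.2 then (some f, pvRank priority f) else st

def pvBest (priority : List String) (g : List String) : Option String × Nat :=
  g.foldl (pvBestStep priority) (none, priority.length)

def select_feature_from_highly_correlated_group_alt (correlated_groups : List (List String)) (keeping_method : String) : List String :=
  let keywords : List String := ["mean", "sum", "var", "max", "min"]
  let priority := keeping_method :: keywords.filter (fun k => k ≠ keeping_method)
  correlated_groups.foldl (fun acc group =>
    acc ++ [match (pvBest priority group).1 with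
            | some f => f
            | none => (PySem.List.pyGet? group 0).getD ""]) []
      -- group[0] raises IndexError on an empty group; excluded by Pre_

-- ===== PRECONDITION & SPEC =====
-- Pre_ excludes exactly the raising inputs: a keeping_method outside the five keywords
-- (list.remove raises ValueError in A) and an empty group (group[0] raises IndexError).
def Pre_select_feature_from_highly_correlated_group (correlated_groups : List (List String)) (keeping_method : String) : Prop :=
  keeping_method ∈ ["mean", "sum", "var", "max", "min"] ∧ ∀ g ∈ correlated_groups, g ≠ []
instance (correlated_groups : List (List String)) (keeping_method : String) : Decidable (Pre_select_feature_from_highly_correlated_group correlated_groups keeping_method) := by unfold Pre_select_feature_from_highly_correlated_group; infer_instance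

def pvWitness_select_feature_from_highly_correlated_group : List (List String) × String :=
  ([["A_MAX", "b_Mean"], ["x_var", "y_sum"], ["foo", "bar"]], "mean")

def Spec_select_feature_from_highly_correlated_group (correlated_groups : List (List String)) (keeping_method : String) (out : List String) : Prop := out = select_feature_from_highly_correlated_group_alt correlated_groups keeping_method
instance (correlated_groups : List (List String)) (keeping_method : String) (out : List String) : Decidable (Spec_select_feature_from_highly_correlated_group correlated_groups keeping_method out) := by unfold Spec_select_feature_from_highly_correlated_group; infer_instance

-- ===== CLAIM (what is proved, stated in full; the proofs are below) =====
def Claim_equal_select_feature_from_highly_correlated_group : Prop := ∀ (correlated_groups : List (List String)) (keeping_method : String), Dom_select_feature_from_highly_correlated_group correlated_groups keeping_method → Pre_select_feature_from_highly_correlated_group correlated_groups keeping_method → Spec_select_feature_from_highly_correlated_group correlated_groups keeping_method (select_feature_from_highly_correlated_group correlated_groups keeping_method)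


-- ===== LEMMAS AND PROOFS =====

-- the rank against k :: ks: 0 if k matches, else one more than the rank against ks
lemma pvRank_cons (k : String) (ks : List String) (f : String) :
    pvRank (k :: ks) f =
      if PySem.Str.isIn k (PySem.Str.lower f) then 0 else pvRank ks f + 1 := by
  simp [pvRank, List.findIdx_cons]

-- the fold is constant once no remaining feature beats the current rank
lemma pvBest_absorb (P : List String) (g : List String) (o : Option String) (r0 : Nat)
    (h : ∀ f ∈ g, ¬ pvRank P f < r0) :
    g.foldl (pvBestStep P) (o, r0) = (o, r0) := by
  induction g with
  | nil => rfl
  | cons f g ih =>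
    have hf := h f (by simp)
    simp only [List.foldl_cons, pvBestStep, if_neg hf]
    exact ih (fun f' hf' => h f' (by simp [hf']))

-- when the head keyword matches nowhere, folding against k :: ks is folding against ks, ranks shifted
lemma pvBest_shift (k : String) (ks : List String) (g : List String)
    (h : ∀ f ∈ g, PySem.Str.isIn k (PySem.Str.lower f) = false) :
    ∀ (o : Option String) (r0 : Nat),
      g.foldl (pvBestStep (k :: ks)) (o, r0 + 1) =
        ((g.foldl (pvBestStep ks) (o, r0)).1, (g.foldl (pvBestStep ks) (o, r0)).2 + 1) := by
  induction g with
  | nil => intro o r0; rfl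
  | cons f g ih =>
    intro o r0
    have hf := h f (by simp)
    have hg : ∀ f' ∈ g, PySem.Str.isIn k (PySem.Str.lower f') = false :=
      fun f' hf' => h f' (by simp [hf'])
    have hf' : PySem.Chars.isIn k.toList (PySem.Chars.lower f.toList) = false := by simpa using hf
    have hr : pvRank (k :: ks) f = pvRank ks f + 1 := by simp [pvRank_cons, hf']
    simp only [List.foldl_cons, pvBestStep, hr, Nat.add_lt_add_iff_right]
    by_cases hlt : pvRank ks f < r0
    · simp only [if_pos hlt]; exact ih hg (some f) (pvRank ks f)
    · simp only [if_neg hlt]; exact ih hg o r0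

-- when the head keyword matches somewhere, the single pass returns its first match
lemma pvBest_found (k : String) (ks : List String) (g : List String) (f0 : String) :
    ∀ (o : Option String) (r0 : Nat), 0 < r0 →
      g.find? (fun s => PySem.Str.isIn k (PySem.Str.lower s)) = some f0 →
      (g.foldl (pvBestStep (k :: ks)) (o, r0)).1 = some f0 := by
  induction g with
  | nil => intro o r0 _ hfind; simp at hfind
  | cons f g ih =>
    intro o r0 hr0 hfind
    by_cases hf : PySem.Str.isIn k (PySem.Str.lower f)
    · rw [List.find?_cons_of_pos (by simpa using hf)] at hfind
      have hr : pvRank (k :: ks) f = 0 := by rw [pvRank_cons, if_pos hf]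
      simp only [List.foldl_cons, pvBestStep, hr, if_pos hr0]
      rw [pvBest_absorb _ _ _ _ (fun f' _ => Nat.not_lt_zero _)]
      simpa using hfind
    · rw [List.find?_cons_of_neg (by simpa using hf)] at hfind
      have hr : pvRank (k :: ks) f = pvRank ks f + 1 := by
        rw [pvRank_cons, if_neg hf]
      simp only [List.foldl_cons, pvBestStep, hr]
      by_cases hlt : pvRank ks f + 1 < r0
      · rw [if_pos hlt]; exact ih (some f) (pvRank ks f + 1) (Nat.succ_pos _) hfind
      · rw [if_neg hlt]; exact ih o r0 hr0 hfind

-- MAIN: A's priority-ordered scans select exactly what B's single ranked pass selects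
lemma typesLoop_eq_best (P : List String) (g : List String) :
    pvTypesLoop P g = (pvBest P g).1 := by
  induction P with
  | nil =>
    simp only [pvBest, List.length_nil]
    rw [show pvTypesLoop [] g = none from rfl,
      pvBest_absorb [] g none 0 (fun f _ => Nat.not_lt_zero _)]
  | cons k ks ih =>
    cases hfind : pvNextKw k g with
    | some f0 =>
      rw [show pvTypesLoop (k :: ks) g =
            (match pvNextKw k g with
             | some f => some f
             | none => pvTypesLoop ks g) from rfl, hfind]
      exact (pvBest_found k ks g f0 none (ks.length + 1) (Nat.succ_pos _) hfind).symm
    | none =>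
      have hnone : ∀ f ∈ g, PySem.Str.isIn k (PySem.Str.lower f) = false := by
        intro f hf
        have := List.find?_eq_none.mp hfind f hf
        simpa using this
      rw [show pvTypesLoop (k :: ks) g =
            (match pvNextKw k g with
             | some f => some f
             | none => pvTypesLoop ks g) from rfl, hfind]
      rw [ih, pvBest, pvBest, show (k :: ks).length = ks.length + 1 from rfl,
        pvBest_shift k ks g hnone none ks.length]

-- erasing the sole occurrence from the literal keyword list is filtering it out
lemma erase_eq_filter (km : String) (h : km ∈ ["mean", "sum", "var", "max", "min"]) :
    (["mean", "sum", "var", "max", "min"] : List String).erase km =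
      (["mean", "sum", "var", "max", "min"] : List String).filter (fun k => k ≠ km) := by
  simp only [List.mem_cons, List.not_mem_nil, or_false] at h
  rcases h with h | h | h | h | h <;> subst h <;> decide

-- ===== VERDICT (by name: the statement is the Claim_ definition above) =====
theorem select_feature_from_highly_correlated_group_spec : Claim_equal_select_feature_from_highly_correlated_group := by
  intro correlated_groups km _ hpre
  obtain ⟨hmem, -⟩ := hpre
  unfold Spec_select_feature_from_highly_correlated_group
  unfold select_feature_from_highly_correlated_group select_feature_from_highly_correlated_group_alt
  rw [PySem.List.remove?_eq_some_erase _ _ hmem, erase_eq_filter km hmem]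
  show List.foldl
      (fun features_to_keep group =>
        match
          (match pvNextKw km group with
           | some f => some f
           | none => pvTypesLoop ((["mean", "sum", "var", "max", "min"] : List String).filter (fun k => k ≠ km)) group) with
        | some f => features_to_keep ++ [f]
        | none => features_to_keep ++ [(PySem.List.pyGet? group 0).getD ""])
      [] correlated_groups =
    List.foldl
      (fun acc group =>
        acc ++ [match (pvBest (km :: (["mean", "sum", "var", "max", "min"] : List String).filter (fun k => k ≠ km)) group).1 with
                | some f => f
                | none => (PySem.List.pyGet? group 0).getD ""])
      [] correlated_groups
  congr 1
  funext acc g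
  have h := typesLoop_eq_best
      (km :: (["mean", "sum", "var", "max", "min"] : List String).filter (fun k => k ≠ km)) g
  rw [show pvTypesLoop
        (km :: (["mean", "sum", "var", "max", "min"] : List String).filter (fun k => k ≠ km)) g =
      (match pvNextKw km g with
       | some f => some f
       | none =>
          pvTypesLoop ((["mean", "sum", "var", "max", "min"] : List String).filter (fun k => k ≠ km)) g)
      from rfl] at h
  rw [← h]
  cases pvNextKw km g
  · cases pvTypesLoop ((["mean", "sum", "var", "max", "min"] : List String).filter (fun k => k ≠ km)) g <;> rfl
  · rfl
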